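-- pv_equiv track=rewrite | github.com/f20251321/assoc_games | Is_this_Hormuz_Laby.py | calculate_live_score
-- ===== SOURCE A (Python) =====
-- CONFIG = {
--     "GRID_SIZE": 11,
--     "MOVES": 12,
--     "SHIP_SIZES": [3, 2, 2, 4],
--
--     # Timers (in seconds)
--     "BOMBING_TIME": 300,   # 5 Minutes
--     "GUESSING_TIME": 120,  # 2 Minutes
--
--     # Point Values (Scaled so an optimal 5.0x run yields ~1500 points)
--     "POINTS": {
--         "base": 430,
--         "hit": 45,
--         "sink": 150,
--         "miss_all": 0,
--         "ship_replication": 260,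
--         "layout_replication": 860,
--         "first_try": 130,
--         "perfect_sink": 110
--     }
-- }
--
-- def get_all_ship_cells(ships):
--     cells = set()
--     for ship in ships:
--         for r, c in ship:
--             cells.add((r, c))
--     return cells
--
-- def calculate_live_score(actual_ships, move_history):
--     score = CONFIG["POINTS"]["base"]
--     hits = sinks = perfect_sinks = 0
--
--     for ship in actual_ships:
--         ship_hits = [i for i, move in enumerate(move_history) if move in ship]
--         hits += len(ship_hits)
--         if len(ship_hits) == len(ship):
--             sinks += 1
--             if max(ship_hits) - min(ship_hits) == len(ship) - 1:
--                 perfect_sinks += 1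
--
--     score += (CONFIG["POINTS"]["hit"] * hits) + (CONFIG["POINTS"]["sink"] * sinks) + (CONFIG["POINTS"]["perfect_sink"] * perfect_sinks)
--
--     if move_history and move_history[0] in get_all_ship_cells(actual_ships):
--         score += CONFIG["POINTS"]["first_try"]
--
--     return score, sinks
-- ===== SOURCE B (Python) =====
-- def _ship_stat(ship, idx):
--     inds = [i for c in set(ship) for i in idx.get(c, [])]
--     full = len(inds) == len(ship)
--     return len(inds), full, full and max(inds) - min(inds) == len(ship) - 1
--
-- def calculate_live_score(actual_ships, move_history):
--     # one pass over the moves: index every cell -> list of move indices that hit it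
--     idx = {}
--     for i, mv in enumerate(move_history):
--         idx.setdefault(mv, []).append(i)
--     stats = [_ship_stat(ship, idx) for ship in actual_ships]
--     hits = sum(s[0] for s in stats)
--     sinks = sum(1 for s in stats if s[1])
--     perfect = sum(1 for s in stats if s[2])
--     score = 430 + 45 * hits + 150 * sinks + 110 * perfect
--     if move_history and any(move_history[0] in ship for ship in actual_ships):
--         score += 130
--     return score, sinks
-- ===== Notes on version B (the rewrite author's own statement) =====
-- stated objective: faster
-- what changed: B builds a dict cell->move-indices in one pass over the move history and looks up each ship cell in it (instead of A's scan of the whole move history with an O(|ship|) membership test per move, for every ship), and computes the totals as sums over a per-ship stats list instead of a running accumulator.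
import Mathlib
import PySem

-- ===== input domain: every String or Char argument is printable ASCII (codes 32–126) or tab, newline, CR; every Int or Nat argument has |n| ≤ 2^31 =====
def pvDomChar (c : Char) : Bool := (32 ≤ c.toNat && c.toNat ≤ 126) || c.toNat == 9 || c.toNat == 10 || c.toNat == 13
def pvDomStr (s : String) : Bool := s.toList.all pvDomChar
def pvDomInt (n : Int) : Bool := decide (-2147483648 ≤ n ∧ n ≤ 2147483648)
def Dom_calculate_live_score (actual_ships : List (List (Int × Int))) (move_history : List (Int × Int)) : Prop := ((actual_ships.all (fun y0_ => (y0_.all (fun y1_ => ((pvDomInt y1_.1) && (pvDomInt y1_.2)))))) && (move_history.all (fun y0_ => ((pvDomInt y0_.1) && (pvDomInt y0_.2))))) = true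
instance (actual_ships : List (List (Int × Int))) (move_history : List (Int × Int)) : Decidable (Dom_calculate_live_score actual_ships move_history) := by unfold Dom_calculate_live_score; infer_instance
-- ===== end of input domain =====

-- B replaces A's per-ship scan of the whole move history by a dict cell→move-indices built in
-- one pass over the moves, and a map+sum decomposition instead of a running accumulator.

-- ===== PORT A =====
def get_all_ship_cells (ships : List (List (Int × Int))) : PySem.Set (Int × Int) :=
  ships.foldl (fun cells ship => ship.foldl (fun cells rc => PySem.Set.add cells rc) cells)
    PySem.Set.empty

-- Python's max()/min() raise on an empty ship_hits list (reached only for an empty ship, which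
-- Pre_ excludes); there the port takes `.getD 0` as a placeholder value.
def calculate_live_score (actual_ships : List (List (Int × Int))) (move_history : List (Int × Int)) : Int × Int :=
  let base : Int := 430
  let hsp : Int × Int × Int := actual_ships.foldl
    (fun st ship =>
      let ship_hits : List Int :=
        ((PySem.List.enumerate move_history).filter (fun im => ship.contains im.2)).map
          (fun im => im.1)
      let hits := st.1 + (ship_hits.length : Int)
      if ship_hits.length = ship.length then
        if ship_hits.max?.getD 0 - ship_hits.min?.getD 0 = (ship.length : Int) - 1 then
          (hits, st.2.1 + 1, st.2.2 + 1)
        else (hits, st.2.1 + 1, st.2.2)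
      else (hits, st.2.1, st.2.2))
    (0, 0, 0)
  let score := base + 45 * hsp.1 + 150 * hsp.2.1 + 110 * hsp.2.2
  let score :=
    match move_history with
    | [] => score
    | m :: _ => if (get_all_ship_cells actual_ships).contains m then score + 130 else score
  (score, hsp.2.1)

-- ===== PORT B =====
-- setdefault(mv, []).append(i) = modify mv [] (· ++ [i]); max()/min() on an empty inds list
-- raise in Python (only for an empty ship, outside Pre_); the port takes `.getD 0` there.
def pvShipStat (ship : List (Int × Int)) (idx : PySem.Dict (Int × Int) (List Int)) :
    Int × Bool × Bool :=
  let inds : List Int := (PySem.Set.ofList ship).flatMap (fun c => idx.getD c [])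
  let full : Bool := inds.length == ship.length
  ((inds.length : Int), full,
    full && (inds.max?.getD 0 - inds.min?.getD 0 == (ship.length : Int) - 1))

def calculate_live_score_alt (actual_ships : List (List (Int × Int))) (move_history : List (Int × Int)) : Int × Int :=
  let idx : PySem.Dict (Int × Int) (List Int) :=
    (PySem.List.enumerate move_history).foldl
      (fun d im => d.modify im.2 [] (fun v => v ++ [im.1])) PySem.Dict.empty
  let stats : List (Int × Bool × Bool) := actual_ships.map (fun ship => pvShipStat ship idx)
  let hits : Int := (stats.map (fun s => s.1)).sum
  let sinks : Int := (stats.countP (fun s => s.2.1) : Int)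
  let perfect : Int := (stats.countP (fun s => s.2.2) : Int)
  let score := 430 + 45 * hits + 150 * sinks + 110 * perfect
  let score :=
    match move_history with
    | [] => score
    | m :: _ => if actual_ships.any (fun ship => ship.contains m) then score + 130 else score
  (score, sinks)

-- ===== PRECONDITION & SPEC =====
-- Pre_ excludes an empty ship in actual_ships: there Python A raises ValueError (max() of the
-- empty ship_hits list); Python B raises there too.
def Pre_calculate_live_score (actual_ships : List (List (Int × Int))) (move_history : List (Int × Int)) : Prop :=
  ∀ ship ∈ actual_ships, ship ≠ []
instance (actual_ships : List (List (Int × Int))) (move_history : List (Int × Int)) : Decidable (Pre_calculate_live_score actual_ships move_history) := by unfold Pre_calculate_live_score; infer_instance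

def pvWitness_calculate_live_score : (List (List (Int × Int))) × (List (Int × Int)) :=
  ([[(0, 0), (0, 1)], [(2, 2)]], [(0, 1), (5, 5), (0, 0), (2, 2)])

def Spec_calculate_live_score (actual_ships : List (List (Int × Int))) (move_history : List (Int × Int)) (out : Int × Int) : Prop := out = calculate_live_score_alt actual_ships move_history
instance (actual_ships : List (List (Int × Int))) (move_history : List (Int × Int)) (out : Int × Int) : Decidable (Spec_calculate_live_score actual_ships move_history out) := by unfold Spec_calculate_live_score; infer_instance

-- ===== CLAIM (what is proved, stated in full; the proofs are below) =====
def Claim_equal_calculate_live_score : Prop := ∀ (actual_ships : List (List (Int × Int))) (move_history : List (Int × Int)), Dom_calculate_live_score actual_ships move_history → Pre_calculate_live_score actual_ships move_history → Spec_calculate_live_score actual_ships move_history (calculate_live_score actual_ships move_history)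

-- ===== LEMMAS AND PROOFS =====

-- max?/min? of an Int list only depend on the multiset of elements
theorem pvPerm_max? (l l' : List Int) (h : l.Perm l') : l.max? = l'.max? := by
  rcases e : l'.max? with _ | m
  · rw [List.max?_eq_none_iff] at e; subst e; simp [h.eq_nil]
  · rw [List.max?_eq_some_iff] at e ⊢
    exact ⟨h.mem_iff.2 e.1, fun b hb => e.2 b (h.mem_iff.1 hb)⟩

theorem pvPerm_min? (l l' : List Int) (h : l.Perm l') : l.min? = l'.min? := by
  rcases e : l'.min? with _ | m
  · rw [List.min?_eq_none_iff] at e; subst e; simp [h.eq_nil]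
  · rw [List.min?_eq_some_iff] at e ⊢
    exact ⟨h.mem_iff.2 e.1, fun b hb => e.2 b (h.mem_iff.1 hb)⟩

-- the dict built by B maps a cell to exactly the move indices that hit it, in order
theorem pvIdx_getD (mh : List (Int × Int)) (c : Int × Int) :
    ((PySem.List.enumerate mh).foldl
        (fun d im => d.modify im.2 [] (fun v => v ++ [im.1])) PySem.Dict.empty).getD c []
      = ((PySem.List.enumerate mh).filter (fun im => im.2 == c)).map (fun im => im.1) := by
  have h := PySem.Dict.getD_foldl_modify_append
    ((PySem.List.enumerate mh).map (fun im => (im.2, im.1)))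
    (PySem.Dict.empty : PySem.Dict (Int × Int) (List Int)) c
  simpa [List.foldl_map, List.filter_map, List.map_map, Function.comp] using h

-- a filter by a disjunction of disjoint tests is a permutation of the two filters concatenated
theorem pvFilter_or_perm {α : Type} (p q : α → Bool)
    (hd : ∀ x, ¬(p x = true ∧ q x = true)) (l : List α) :
    (l.filter (fun x => p x || q x)).Perm (l.filter p ++ l.filter q) := by
  induction l with
  | nil => simp
  | cons a t ih =>
    by_cases hp : p a = true
    · have hq : q a = false := by
        cases e : q a
        · rfl
        · exact absurd ⟨hp, e⟩ (hd a)
      simpa [hp, hq] using ih.cons a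
    · by_cases hq : q a = true
      · simpa [hp, hq] using (ih.cons a).trans List.perm_middle.symm
      · simpa [hp, hq] using ih

-- partitioning a filter by membership over the distinct values
theorem pvFlatMap_filter_perm (S : List (Int × Int)) (hnd : S.Nodup)
    (l : List (Int × (Int × Int))) :
    (S.flatMap (fun c => l.filter (fun im => im.2 == c))).Perm
      (l.filter (fun im => S.contains im.2)) := by
  induction S with
  | nil => simp
  | cons c S ih =>
    rcases List.nodup_cons.1 hnd with ⟨hc, hS⟩
    have hdis : ∀ im : Int × (Int × Int), ¬((im.2 == c) = true ∧ S.contains im.2 = true) := by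
      rintro im ⟨h1, h2⟩
      exact hc (by simpa [beq_iff_eq.1 h1] using (List.contains_iff_mem).1 h2)
    have hperm := (pvFilter_or_perm (fun im => im.2 == c) (fun im => S.contains im.2) hdis l).symm
    have : (l.filter (fun im => (c :: S).contains im.2))
        = l.filter (fun im => (im.2 == c) || S.contains im.2) := by
      apply List.filter_congr; intro x _; rw [Bool.eq_iff_iff]; simp
    rw [List.flatMap_cons, this]
    exact (((ih hS).append_left (l.filter (fun im => im.2 == c)))).trans hperm

-- B's per-ship index list is a permutation of A's ship_hits
theorem pvInds_perm (mh : List (Int × Int)) (ship : List (Int × Int)) :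
    ((PySem.Set.ofList ship).flatMap (fun c =>
        ((PySem.List.enumerate mh).foldl
          (fun d im => d.modify im.2 [] (fun v => v ++ [im.1])) PySem.Dict.empty).getD c [])).Perm
      (((PySem.List.enumerate mh).filter (fun im => ship.contains im.2)).map (fun im => im.1)) := by
  simp only [pvIdx_getD]
  rw [← List.map_flatMap]
  apply List.Perm.map
  have h := pvFlatMap_filter_perm (PySem.Set.ofList ship) (PySem.Set.nodup_ofList ship)
    (PySem.List.enumerate mh)
  have hpq : ∀ x ∈ PySem.List.enumerate mh,
      (List.contains (PySem.Set.ofList ship) x.2) = (ship.contains x.2) := by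
    intro x _
    rw [Bool.eq_iff_iff]
    simp [PySem.Set.mem_ofList]
  exact (List.filter_congr hpq) ▸ h

-- a fold adding independent per-element contributions to a triple is the triple of sums
theorem pvFoldl_add3 {α : Type} (f1 f2 f3 : α → Int) (l : List α) (h s p : Int) :
    l.foldl (fun st x => (st.1 + f1 x, st.2.1 + f2 x, st.2.2 + f3 x)) (h, s, p)
      = (h + (l.map f1).sum, s + (l.map f2).sum, p + (l.map f3).sum) := by
  induction l generalizing h s p with
  | nil => simp
  | cons a t ih => simp [ih, add_assoc]

-- first-move membership: the all-cells set of A is B's any-ship test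
theorem pvGet_all_mem (ships : List (List (Int × Int))) (m : Int × Int) :
    (get_all_ship_cells ships).contains m = ships.any (fun ship => ship.contains m) := by
  rw [Bool.eq_iff_iff]
  have key : ∀ (acc : PySem.Set (Int × Int)),
      m ∈ ships.foldl (fun cells ship => ship.foldl (fun cells rc => PySem.Set.add cells rc) cells) acc
        ↔ m ∈ acc ∨ ∃ s ∈ ships, m ∈ s := by
    induction ships with
    | nil => simp
    | cons a t ih =>
      intro acc
      have : (a.foldl (fun cells rc => PySem.Set.add cells rc) acc) = PySem.Set.update acc a := rfl
      simp only [List.foldl_cons, ih, this, PySem.Set.mem_update]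
      constructor
      · rintro (⟨h | h⟩ | ⟨s, hs, hm⟩)
        · exact Or.inl h
        · exact Or.inr ⟨a, by simp, h⟩
        · exact Or.inr ⟨s, by simp [hs], hm⟩
      · rintro (h | ⟨s, hs, hm⟩)
        · exact Or.inl (Or.inl h)
        · rcases List.mem_cons.1 hs with rfl | hs
          · exact Or.inl (Or.inr hm)
          · exact Or.inr ⟨s, hs, hm⟩
  simp [get_all_ship_cells, PySem.Set.contains_eq_listContains,
    List.any_eq_true, key, PySem.Set.empty]

-- reference per-ship quantities (A's ship_hits list and its three per-ship contributions)
def pvHits (mh ship : List (Int × Int)) : List Int :=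
  ((PySem.List.enumerate mh).filter (fun im => ship.contains im.2)).map (fun im => im.1)

def pvInds (mh ship : List (Int × Int)) : List Int :=
  (PySem.Set.ofList ship).flatMap (fun c =>
    ((PySem.List.enumerate mh).foldl
      (fun d im => d.modify im.2 [] (fun v => v ++ [im.1])) PySem.Dict.empty).getD c [])

def pvF1 (mh ship : List (Int × Int)) : Int := ((pvHits mh ship).length : Int)
def pvF2 (mh ship : List (Int × Int)) : Int :=
  if (pvHits mh ship).length = ship.length then 1 else 0
def pvF3 (mh ship : List (Int × Int)) : Int :=
  if (pvHits mh ship).length = ship.length ∧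
      (pvHits mh ship).max?.getD 0 - (pvHits mh ship).min?.getD 0 = (ship.length : Int) - 1
    then 1 else 0

theorem pvLen_eq (mh ship : List (Int × Int)) :
    (pvInds mh ship).length = (pvHits mh ship).length :=
  (pvInds_perm mh ship).length_eq

theorem pvMax_eq (mh ship : List (Int × Int)) :
    (pvInds mh ship).max? = (pvHits mh ship).max? :=
  pvPerm_max? _ _ (pvInds_perm mh ship)

theorem pvMin_eq (mh ship : List (Int × Int)) :
    (pvInds mh ship).min? = (pvHits mh ship).min? :=
  pvPerm_min? _ _ (pvInds_perm mh ship)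

-- A's running-accumulator fold is the triple of per-ship sums
theorem pvA_fold (ships : List (List (Int × Int))) (mh : List (Int × Int)) :
    ships.foldl
      (fun st ship =>
        if ((((PySem.List.enumerate mh).filter (fun im => ship.contains im.2)).map
              (fun im => im.1)).length : Nat) = ship.length then
          if (((PySem.List.enumerate mh).filter (fun im => ship.contains im.2)).map
                (fun im => im.1)).max?.getD 0 -
              (((PySem.List.enumerate mh).filter (fun im => ship.contains im.2)).map
                (fun im => im.1)).min?.getD 0 = (ship.length : Int) - 1 then
            (st.1 + ((((PySem.List.enumerate mh).filter (fun im => ship.contains im.2)).map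
              (fun im => im.1)).length : Int), st.2.1 + 1, st.2.2 + 1)
          else (st.1 + ((((PySem.List.enumerate mh).filter (fun im => ship.contains im.2)).map
              (fun im => im.1)).length : Int), st.2.1 + 1, st.2.2)
        else (st.1 + ((((PySem.List.enumerate mh).filter (fun im => ship.contains im.2)).map
              (fun im => im.1)).length : Int), st.2.1, st.2.2))
      ((0 : Int), (0 : Int), (0 : Int))
      = ((ships.map (pvF1 mh)).sum, (ships.map (pvF2 mh)).sum, (ships.map (pvF3 mh)).sum) := by
  have hfun : (fun (st : Int × Int × Int) (ship : List (Int × Int)) =>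
        if ((((PySem.List.enumerate mh).filter (fun im => ship.contains im.2)).map
              (fun im => im.1)).length : Nat) = ship.length then
          if (((PySem.List.enumerate mh).filter (fun im => ship.contains im.2)).map
                (fun im => im.1)).max?.getD 0 -
              (((PySem.List.enumerate mh).filter (fun im => ship.contains im.2)).map
                (fun im => im.1)).min?.getD 0 = (ship.length : Int) - 1 then
            (st.1 + ((((PySem.List.enumerate mh).filter (fun im => ship.contains im.2)).map
              (fun im => im.1)).length : Int), st.2.1 + 1, st.2.2 + 1)
          else (st.1 + ((((PySem.List.enumerate mh).filter (fun im => ship.contains im.2)).map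
              (fun im => im.1)).length : Int), st.2.1 + 1, st.2.2)
        else (st.1 + ((((PySem.List.enumerate mh).filter (fun im => ship.contains im.2)).map
              (fun im => im.1)).length : Int), st.2.1, st.2.2))
      = (fun st ship => (st.1 + pvF1 mh ship, st.2.1 + pvF2 mh ship, st.2.2 + pvF3 mh ship)) := by
    funext st ship
    simp only [pvF1, pvF2, pvF3, pvHits]
    split_ifs with h1 h2 <;> simp_all
  rw [hfun, pvFoldl_add3]
  simp

-- B's per-ship stat triple, evaluated through the dict, in terms of A's ship_hits
theorem pvShipStat_eval (mh ship : List (Int × Int)) :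
    pvShipStat ship ((PySem.List.enumerate mh).foldl
        (fun d im => d.modify im.2 [] (fun v => v ++ [im.1])) PySem.Dict.empty)
      = (((pvHits mh ship).length : Int),
          (pvHits mh ship).length == ship.length,
          ((pvHits mh ship).length == ship.length) &&
            ((pvHits mh ship).max?.getD 0 - (pvHits mh ship).min?.getD 0
              == (ship.length : Int) - 1)) := by
  have h1 := pvLen_eq mh ship
  have h2 := pvMax_eq mh ship
  have h3 := pvMin_eq mh ship
  simp only [pvShipStat, pvInds, pvHits] at *
  rw [h1, h2, h3]

-- ===== VERDICT (by name: the statement is the Claim_ definition above) =====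
theorem calculate_live_score_spec : Claim_equal_calculate_live_score := by
  intro ships mh _ _
  unfold Spec_calculate_live_score calculate_live_score calculate_live_score_alt
  simp only [pvGet_all_mem, pvShipStat_eval]
  rw [pvA_fold]
  have hB1 : ((ships.map (fun ship =>
        (((pvHits mh ship).length : Int),
          (pvHits mh ship).length == ship.length,
          ((pvHits mh ship).length == ship.length) &&
            ((pvHits mh ship).max?.getD 0 - (pvHits mh ship).min?.getD 0
              == (ship.length : Int) - 1)))).map (fun s => s.1)).sum
      = (ships.map (pvF1 mh)).sum := by
    rw [List.map_map]; rfl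
  have hB2 : (((ships.map (fun ship =>
        (((pvHits mh ship).length : Int),
          (pvHits mh ship).length == ship.length,
          ((pvHits mh ship).length == ship.length) &&
            ((pvHits mh ship).max?.getD 0 - (pvHits mh ship).min?.getD 0
              == (ship.length : Int) - 1)))).countP (fun s => s.2.1)) : Int)
      = (ships.map (pvF2 mh)).sum := by
    rw [List.countP_map]
    simp only [Function.comp_def]
    rw [← PySem.List.sum_map_ite_one_zero
      (fun ship : List (Int × Int) => (pvHits mh ship).length == ship.length) ships]
    apply congrArg
    apply List.map_congr_left
    intro ship _
    by_cases h : (pvHits mh ship).length = ship.length <;> simp [pvF2, h]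
  have hB3 : (((ships.map (fun ship =>
        (((pvHits mh ship).length : Int),
          (pvHits mh ship).length == ship.length,
          ((pvHits mh ship).length == ship.length) &&
            ((pvHits mh ship).max?.getD 0 - (pvHits mh ship).min?.getD 0
              == (ship.length : Int) - 1)))).countP (fun s => s.2.2)) : Int)
      = (ships.map (pvF3 mh)).sum := by
    rw [List.countP_map]
    simp only [Function.comp_def]
    rw [← PySem.List.sum_map_ite_one_zero
      (fun ship : List (Int × Int) => ((pvHits mh ship).length == ship.length) &&
        ((pvHits mh ship).max?.getD 0 - (pvHits mh ship).min?.getD 0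
          == (ship.length : Int) - 1)) ships]
    apply congrArg
    apply List.map_congr_left
    intro ship _
    by_cases h : (pvHits mh ship).length = ship.length
    · by_cases h2 : (pvHits mh ship).max?.getD 0 - (pvHits mh ship).min?.getD 0
          = (ship.length : Int) - 1 <;> simp [pvF3, h, h2]
    · simp [pvF3, h]
  simp only [hB1, hB2, hB3]
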